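-- pv_equiv track=rewrite | github.com/tkamsker/gha1javarag | src/chunking.py | _determine_architectural_layer
-- ===== SOURCE A (Python) =====
-- from typing import List, Dict, Any, Optional, Tuple
--
-- def _determine_architectural_layer(class_info: Dict[str, Any], metadata: Dict[str, Any]) -> str:
--     """Determine the architectural layer of a class."""
--     class_name = class_info.get('name', '').lower()
--     package = class_info.get('package', '').lower()
--
--     # Check package patterns
--     if any(keyword in package for keyword in ['dao', 'repository', 'entity', 'model']):
--         return 'database'
--     elif any(keyword in package for keyword in ['service', 'controller', 'manager', 'handler']):
--         return 'backend'
--     elif any(keyword in package for keyword in ['ui', 'view', 'presenter', 'widget']):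
--         return 'ui'
--
--     # Check class name patterns
--     if any(keyword in class_name for keyword in ['dao', 'repository', 'entity', 'model']):
--         return 'database'
--     elif any(keyword in class_name for keyword in ['service', 'controller', 'manager', 'handler']):
--         return 'backend'
--     elif any(keyword in class_name for keyword in ['ui', 'view', 'presenter', 'widget']):
--         return 'ui'
--
--     return 'backend'  # Default
-- ===== SOURCE B (Python) =====
-- # Single-pass arithmetic ranking: scan all 12 keywords against both fields once,
-- # keep the minimum priority rank (field*3 + layer), decode the rank at the end.
-- _KEYWORDS = {
--     'dao': 0, 'repository': 0, 'entity': 0, 'model': 0,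
--     'service': 1, 'controller': 1, 'manager': 1, 'handler': 1,
--     'ui': 2, 'view': 2, 'presenter': 2, 'widget': 2,
-- }
-- _NAMES = {0: 'database', 1: 'backend', 2: 'ui'}
--
-- def _determine_architectural_layer(class_info, metadata):
--     texts = (class_info.get('package', '').lower(),
--              class_info.get('name', '').lower())
--     best = 6  # rank 6 = no keyword matched anywhere
--     for pos, text in enumerate(texts):
--         for kw, layer in _KEYWORDS.items():
--             if kw in text:
--                 best = min(best, pos * 3 + layer)
--     if best == 6:
--         return 'backend'
--     return _NAMES.get(best % 3, '')
-- ===== Notes on version B (the rewrite author's own statement) =====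
-- stated objective: alternative
-- what changed: Replaces the six short-circuiting branch chains by a single exhaustive pass that scores every keyword occurrence with an arithmetic rank (field*3 + layer), keeps the minimum rank, and decodes it to a layer name at the end.
import Mathlib
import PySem

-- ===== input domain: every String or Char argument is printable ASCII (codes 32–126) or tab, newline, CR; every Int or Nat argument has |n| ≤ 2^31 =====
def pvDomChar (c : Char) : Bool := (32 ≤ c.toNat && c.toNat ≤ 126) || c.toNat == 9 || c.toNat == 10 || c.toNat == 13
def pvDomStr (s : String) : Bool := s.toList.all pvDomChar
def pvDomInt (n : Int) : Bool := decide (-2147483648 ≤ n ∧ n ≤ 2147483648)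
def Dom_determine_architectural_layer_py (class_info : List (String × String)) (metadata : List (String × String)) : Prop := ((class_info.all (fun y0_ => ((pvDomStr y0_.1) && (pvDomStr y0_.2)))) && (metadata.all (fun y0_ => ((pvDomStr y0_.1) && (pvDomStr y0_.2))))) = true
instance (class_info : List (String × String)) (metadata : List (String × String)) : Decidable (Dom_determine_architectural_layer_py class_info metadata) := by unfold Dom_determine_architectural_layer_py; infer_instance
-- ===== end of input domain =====

-- B replaces the six short-circuiting branch chains by one exhaustive min-rank scan
-- over a keyword→layer table (rank = field*3 + layer), decoded at the end (objective: alternative).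

-- ===== PORT A =====
-- class_info.get(k, '') : first match in the association list, else ''
def pvGetDStr (d : List (String × String)) (k : String) : String :=
  match d.find? (fun p => p.1 == k) with
  | some p => p.2
  | none => ""

def determine_architectural_layer_py (class_info : List (String × String)) (_metadata : List (String × String)) : String :=
  let class_name := PySem.Str.lower (pvGetDStr class_info "name")
  let package := PySem.Str.lower (pvGetDStr class_info "package")
  if ["dao", "repository", "entity", "model"].any (fun kw => PySem.Str.isIn kw package) then "database"
  else if ["service", "controller", "manager", "handler"].any (fun kw => PySem.Str.isIn kw package) then "backend"
  else if ["ui", "view", "presenter", "widget"].any (fun kw => PySem.Str.isIn kw package) then "ui"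
  else if ["dao", "repository", "entity", "model"].any (fun kw => PySem.Str.isIn kw class_name) then "database"
  else if ["service", "controller", "manager", "handler"].any (fun kw => PySem.Str.isIn kw class_name) then "backend"
  else if ["ui", "view", "presenter", "widget"].any (fun kw => PySem.Str.isIn kw class_name) then "ui"
  else "backend"

-- ===== PORT B =====
-- _KEYWORDS.items() in insertion order
def pvKeywords : List (String × Nat) :=
  [("dao", 0), ("repository", 0), ("entity", 0), ("model", 0),
   ("service", 1), ("controller", 1), ("manager", 1), ("handler", 1),
   ("ui", 2), ("view", 2), ("presenter", 2), ("widget", 2)]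

def pvNames : PySem.Dict Nat String :=
  PySem.Dict.mk [(0, "database"), (1, "backend"), (2, "ui")]

-- inner 'for kw, layer in _KEYWORDS.items()' loop for one text at position pos
def pvScan (text : String) (pos : Nat) (best : Nat) : Nat :=
  pvKeywords.foldl (fun b p => if PySem.Str.isIn p.1 text then min b (pos * 3 + p.2) else b) best

def determine_architectural_layer_py_alt (class_info : List (String × String)) (_metadata : List (String × String)) : String :=
  let package := PySem.Str.lower (pvGetDStr class_info "package")
  let class_name := PySem.Str.lower (pvGetDStr class_info "name")
  let best := pvScan class_name 1 (pvScan package 0 6)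
  if best == 6 then "backend"
  else PySem.Dict.getD pvNames (best % 3) ""

-- ===== PRECONDITION & SPEC =====
def Spec_determine_architectural_layer_py (class_info : List (String × String)) (metadata : List (String × String)) (out : String) : Prop := out = determine_architectural_layer_py_alt class_info metadata
instance (class_info : List (String × String)) (metadata : List (String × String)) (out : String) : Decidable (Spec_determine_architectural_layer_py class_info metadata out) := by unfold Spec_determine_architectural_layer_py; infer_instance

-- ===== CLAIM (what is proved, stated in full; the proofs are below) =====
def Claim_equal_determine_architectural_layer_py : Prop := ∀ (class_info : List (String × String)) (metadata : List (String × String)), Dom_determine_architectural_layer_py class_info metadata → Spec_determine_architectural_layer_py class_info metadata (determine_architectural_layer_py class_info metadata)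

-- ===== LEMMAS AND PROOFS =====

-- folding the min-rank update over a constant-layer keyword group
theorem pv_min_fold (t : String) (v : Nat) (kws : List String) (b : Nat) :
    kws.foldl (fun b kw => if PySem.Str.isIn kw t then min b v else b) b
      = if kws.any (fun kw => PySem.Str.isIn kw t) then min b v else b := by
  induction kws generalizing b with
  | nil => simp
  | cons k ks ih =>
    simp only [List.foldl_cons, List.any_cons, Bool.or_eq_true]
    rw [ih]
    split_ifs <;> first | omega | tauto

-- one pvScan pass = first matching group, as a nested if
theorem pv_scan_eq (t : String) (pos b : Nat) :
    pvScan t pos b =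
      if ["dao", "repository", "entity", "model"].any (fun kw => PySem.Str.isIn kw t) then min b (pos * 3 + 0)
      else if ["service", "controller", "manager", "handler"].any (fun kw => PySem.Str.isIn kw t) then min b (pos * 3 + 1)
      else if ["ui", "view", "presenter", "widget"].any (fun kw => PySem.Str.isIn kw t) then min b (pos * 3 + 2)
      else b := by
  have h : pvScan t pos b =
      (["ui", "view", "presenter", "widget"].foldl (fun b kw => if PySem.Str.isIn kw t then min b (pos * 3 + 2) else b)
        (["service", "controller", "manager", "handler"].foldl (fun b kw => if PySem.Str.isIn kw t then min b (pos * 3 + 1) else b)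
          (["dao", "repository", "entity", "model"].foldl (fun b kw => if PySem.Str.isIn kw t then min b (pos * 3 + 0) else b) b))) := by
    simp only [pvScan, pvKeywords, List.foldl_cons, List.foldl_nil]
  rw [h, pv_min_fold, pv_min_fold, pv_min_fold]
  split_ifs <;> omega
-- ===== VERDICT (by name: the statement is the Claim_ definition above) =====
theorem determine_architectural_layer_py_spec : Claim_equal_determine_architectural_layer_py := by
  intro class_info metadata _
  unfold Spec_determine_architectural_layer_py determine_architectural_layer_py determine_architectural_layer_py_alt
  simp only [pv_scan_eq]
  split_ifs <;> simp_all <;> rfl
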